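-- pv_equiv track=rewrite | github.com/AleNunez5/Repo-github-TP | Fast_API/main.py | format_recommendations_2
-- ===== SOURCE A (Python) =====
-- from typing import List, Dict
--
-- def format_recommendations_2(recommendations: List[Dict[str, str]]) -> Dict[str, Dict[str, List[str]]]:
--     formatted_recommendations = {}
--     for rec in recommendations:
--         user_id = rec[0]  # Supongo que el ID del usuario es el primer elemento de cada registro
--         date = rec[1]  # Supongo que la fecha es el segundo elemento de cada registro
--         product_id = rec[2]  # Supongo que el ID del producto es el tercer elemento de cada registro
--
--         # Agrupar las recomendaciones por fecha
--         formatted_recommendations.setdefault(date, {}).setdefault(user_id, []).append(product_id)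
--     return formatted_recommendations
-- ===== SOURCE B (Python) =====
-- def format_recommendations_2(recommendations):
--     # One flat grouping pass keyed by the (date, user) pair, then a regrouping
--     # pass over the flat dict's items to build the nested dict.
--     flat = {}
--     for rec in recommendations:
--         flat.setdefault((rec[1], rec[0]), []).append(rec[2])
--     result = {}
--     for (date, user), products in flat.items():
--         result.setdefault(date, {})[user] = products
--     return result
-- ===== Notes on version B (the rewrite author's own statement) =====
-- stated objective: alternative
-- what changed: Replaces A's single pass of nested setdefault into a dict-of-dicts by a flat grouping pass keyed by the (date, user) pair followed by a separate regrouping pass over the flat dict's items.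
import Mathlib
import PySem

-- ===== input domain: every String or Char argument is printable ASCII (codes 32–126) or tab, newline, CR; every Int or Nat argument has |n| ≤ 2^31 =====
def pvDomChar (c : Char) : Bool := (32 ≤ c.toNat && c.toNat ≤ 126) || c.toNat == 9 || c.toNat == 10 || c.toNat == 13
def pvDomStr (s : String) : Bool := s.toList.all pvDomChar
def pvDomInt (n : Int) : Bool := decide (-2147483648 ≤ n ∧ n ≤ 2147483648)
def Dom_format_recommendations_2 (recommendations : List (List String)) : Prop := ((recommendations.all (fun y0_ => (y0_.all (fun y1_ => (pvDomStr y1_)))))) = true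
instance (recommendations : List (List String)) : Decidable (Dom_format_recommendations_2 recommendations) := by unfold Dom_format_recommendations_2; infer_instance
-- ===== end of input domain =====

-- B replaces A's single-pass nested setdefault dict-of-dicts with a flat grouping pass keyed by the
-- (date, user) pair followed by a regrouping pass over the flat dict's items (objective: alternative).

-- ===== PORT A =====
def format_recommendations_2 (recommendations : List (List String)) : List (String × List (String × List String)) :=
  let formatted := recommendations.foldl (fun d rec =>
    match PySem.List.pyGet? rec 0, PySem.List.pyGet? rec 1, PySem.List.pyGet? rec 2 with
    | some user_id, some date, some product_id =>
        -- formatted_recommendations.setdefault(date, {}).setdefault(user_id, []).append(product_id)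
        d.modify date PySem.Dict.empty (fun inner => inner.modify user_id [] (fun l => l ++ [product_id]))
    | _, _, _ => d)  -- Python raises IndexError on a record shorter than 3; excluded by Pre_
    PySem.Dict.empty
  formatted.items.map (fun kv => (kv.1, kv.2.items))

-- ===== PORT B =====
def format_recommendations_2_alt (recommendations : List (List String)) : List (String × List (String × List String)) :=
  let flat := recommendations.foldl (fun f rec =>
    -- flat.setdefault((rec[1], rec[0]), []).append(rec[2]); a record shorter than 3
    -- raises IndexError in Python (pyGet? = none), excluded by Pre_
    (((PySem.List.pyGet? rec 1).bind fun date =>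
      (PySem.List.pyGet? rec 0).bind fun user =>
      (PySem.List.pyGet? rec 2).map fun prod =>
        f.modify (date, user) [] (fun l => l ++ [prod])).getD f))
    PySem.Dict.empty
  let result := flat.items.foldl (fun r kv =>
    -- result.setdefault(date, {})[user] = products
    r.modify kv.1.1 PySem.Dict.empty (fun inner => inner.insert kv.1.2 kv.2)) PySem.Dict.empty
  result.items.map (fun kv => (kv.1, kv.2.items))

-- ===== PRECONDITION & SPEC =====
-- Pre_ excludes records shorter than 3 elements, on which the Python raises IndexError.
def Pre_format_recommendations_2 (recommendations : List (List String)) : Prop :=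
  ∀ rec ∈ recommendations, 3 ≤ rec.length
instance (recommendations : List (List String)) : Decidable (Pre_format_recommendations_2 recommendations) := by unfold Pre_format_recommendations_2; infer_instance

def pvWitness_format_recommendations_2 : List (List String) :=
  [["u1", "2024-01-01", "p1"], ["u2", "2024-01-01", "p2"], ["u1", "2024-01-02", "p3"]]

def Spec_format_recommendations_2 (recommendations : List (List String)) (out : List (String × List (String × List String))) : Prop := out = format_recommendations_2_alt recommendations
instance (recommendations : List (List String)) (out : List (String × List (String × List String))) : Decidable (Spec_format_recommendations_2 recommendations out) := by unfold Spec_format_recommendations_2; infer_instance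

-- ===== CLAIM (what is proved, stated in full; the proofs are below) =====
def Claim_equal_format_recommendations_2 : Prop := ∀ (recommendations : List (List String)), Dom_format_recommendations_2 recommendations → Pre_format_recommendations_2 recommendations → Spec_format_recommendations_2 recommendations (format_recommendations_2 recommendations)

-- ===== LEMMAS AND PROOFS =====

-- Triples (date, user, product) extracted from a record of length ≥ 3.
def pvToT (rec : List String) : String × String × String :=
  (rec.getD 1 "", rec.getD 0 "", rec.getD 2 "")

-- A's loop body, on triples.
def pvStepN (r : PySem.Dict String (PySem.Dict String (List String))) (t : String × String × String) :
    PySem.Dict String (PySem.Dict String (List String)) :=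
  r.modify t.1 PySem.Dict.empty (fun inner => inner.modify t.2.1 [] (fun l => l ++ [t.2.2]))

-- B's first loop body, on triples.
def pvStepF (f : PySem.Dict (String × String) (List String)) (t : String × String × String) :
    PySem.Dict (String × String) (List String) :=
  f.modify (t.1, t.2.1) [] (fun l => l ++ [t.2.2])

-- B's second loop body.
def pvStep2 (r : PySem.Dict String (PySem.Dict String (List String)))
    (kv : (String × String) × List String) :
    PySem.Dict String (PySem.Dict String (List String)) :=
  r.modify kv.1.1 PySem.Dict.empty (fun inner => inner.insert kv.1.2 kv.2)

def pvNested (ts : List (String × String × String)) : PySem.Dict String (PySem.Dict String (List String)) :=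
  ts.foldl pvStepN PySem.Dict.empty

def pvFlat (ts : List (String × String × String)) : PySem.Dict (String × String) (List String) :=
  ts.foldl pvStepF PySem.Dict.empty

def pvRegroup (f : PySem.Dict (String × String) (List String)) : PySem.Dict String (PySem.Dict String (List String)) :=
  f.items.foldl pvStep2 PySem.Dict.empty

theorem pvGet_bridge (rec : List String) (h : 3 ≤ rec.length) :
    PySem.List.pyGet? rec 0 = some (rec.getD 0 "") ∧
    PySem.List.pyGet? rec 1 = some (rec.getD 1 "") ∧
    PySem.List.pyGet? rec 2 = some (rec.getD 2 "") := by
  rcases rec with _ | ⟨a, _ | ⟨b, _ | ⟨c, rest⟩⟩⟩ <;> simp at h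
  refine ⟨?_, ?_, ?_⟩ <;>
    · simp [PySem.List.pyGet?, PySem.List.pyIdx?]
      rw [if_pos (by omega)]
      rfl

theorem pvFoldA_bridge (recs : List (List String)) :
    ∀ (d : PySem.Dict String (PySem.Dict String (List String))),
    (∀ rec ∈ recs, 3 ≤ rec.length) →
    recs.foldl (fun d rec =>
      match PySem.List.pyGet? rec 0, PySem.List.pyGet? rec 1, PySem.List.pyGet? rec 2 with
      | some user_id, some date, some product_id =>
          d.modify date PySem.Dict.empty (fun inner => inner.modify user_id [] (fun l => l ++ [product_id]))
      | _, _, _ => d) d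
    = (recs.map pvToT).foldl pvStepN d := by
  induction recs with
  | nil => intro d _; rfl
  | cons rec recs ih =>
    intro d h
    obtain ⟨h0, h1, h2⟩ := pvGet_bridge rec (h rec (by simp))
    simp only [List.foldl_cons, List.map_cons, h0, h1, h2]
    exact ih _ (fun r hr => h r (by simp [hr]))

theorem pvFoldB_bridge (recs : List (List String)) :
    ∀ (f : PySem.Dict (String × String) (List String)),
    (∀ rec ∈ recs, 3 ≤ rec.length) →
    recs.foldl (fun f rec =>
      (((PySem.List.pyGet? rec 1).bind fun date =>
        (PySem.List.pyGet? rec 0).bind fun user =>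
        (PySem.List.pyGet? rec 2).map fun prod =>
          f.modify (date, user) [] (fun l => l ++ [prod])).getD f)) f
    = (recs.map pvToT).foldl pvStepF f := by
  induction recs with
  | nil => intro f _; rfl
  | cons rec recs ih =>
    intro f h
    obtain ⟨h0, h1, h2⟩ := pvGet_bridge rec (h rec (by simp))
    simp only [List.foldl_cons, List.map_cons, h0, h1, h2]
    exact ih _ (fun r hr => h r (by simp [hr]))

theorem pvInsert_comm {ν : Type} (ρ : PySem.Dict String ν) (d d' : String) (X J : ν)
    (hne : d' ≠ d) (hd : ρ.contains d = true) :
    (ρ.insert d X).insert d' J = (ρ.insert d' J).insert d X := by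
  apply PySem.Dict.ext
  by_cases hd' : ρ.contains d' = true
  · rw [PySem.Dict.items_insert_of_contains _ J (by rw [PySem.Dict.contains_insert]; simp [hd']),
        PySem.Dict.items_insert_of_contains _ X hd,
        PySem.Dict.items_insert_of_contains _ X (by rw [PySem.Dict.contains_insert]; simp [hd]),
        PySem.Dict.items_insert_of_contains _ J hd']
    simp only [List.map_map]
    apply List.map_congr_left
    intro p _
    simp only [Function.comp]
    by_cases h1 : p.1 = d <;> by_cases h2 : p.1 = d' <;> simp [h1, h2, hne, Ne.symm hne]
  · rw [PySem.Dict.items_insert_of_not_contains _ J (by rw [PySem.Dict.contains_insert]; simp [hne]; simpa using hd'),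
        PySem.Dict.items_insert_of_contains _ X hd,
        PySem.Dict.items_insert_of_contains _ X (by rw [PySem.Dict.contains_insert]; simp [hd]),
        PySem.Dict.items_insert_of_not_contains _ J (by simpa using hd')]
    simp [hne]

theorem pvStar (d u : String) (v : List String) :
    ∀ (L : List ((String × String) × List String)) (ρ : PySem.Dict String (PySem.Dict String (List String))),
    (d, u) ∉ L.map (·.1) → ρ.contains d = true → (ρ.getD d PySem.Dict.empty).contains u = true →
    L.foldl pvStep2 (ρ.insert d ((ρ.getD d PySem.Dict.empty).insert u v))
      = (L.foldl pvStep2 ρ).insert d (((L.foldl pvStep2 ρ).getD d PySem.Dict.empty).insert u v) := by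
  intro L
  induction L with
  | nil => intro ρ _ _ _; rfl
  | cons kv L ih =>
    intro ρ hmem hd hu
    obtain ⟨⟨d', u'⟩, y⟩ := kv
    simp only [List.map_cons, List.mem_cons] at hmem
    push Not at hmem
    obtain ⟨hne, hmem'⟩ := hmem
    simp only [List.foldl_cons]
    by_cases hdd : d' = d
    · subst hdd
      have hu' : u' ≠ u := by intro h; exact hne (by simp [h])
      have key : pvStep2 (ρ.insert d' ((ρ.getD d' PySem.Dict.empty).insert u v)) ((d', u'), y)
          = (pvStep2 ρ ((d', u'), y)).insert d'
            (((pvStep2 ρ ((d', u'), y)).getD d' PySem.Dict.empty).insert u v) := by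
        simp only [pvStep2, PySem.Dict.modify]
        rw [PySem.Dict.getD_insert_self, PySem.Dict.insert_insert_self,
            PySem.Dict.getD_insert_self, PySem.Dict.insert_insert_self,
            pvInsert_comm _ u u' v y hu' hu]
      rw [key, ih _ hmem'
        (by rw [pvStep2, PySem.Dict.modify, PySem.Dict.contains_insert]; simp)
        (by rw [pvStep2, PySem.Dict.modify, PySem.Dict.getD_insert_self, PySem.Dict.contains_insert, hu]; simp)]
    · have key : pvStep2 (ρ.insert d ((ρ.getD d PySem.Dict.empty).insert u v)) ((d', u'), y)
          = (pvStep2 ρ ((d', u'), y)).insert d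
            (((pvStep2 ρ ((d', u'), y)).getD d PySem.Dict.empty).insert u v) := by
        simp only [pvStep2, PySem.Dict.modify]
        rw [PySem.Dict.getD_insert, if_neg hdd,
            pvInsert_comm ρ d d' ((ρ.getD d PySem.Dict.empty).insert u v) _ hdd hd,
            PySem.Dict.getD_insert, if_neg (fun h => hdd h.symm)]
      rw [key, ih _ hmem'
        (by rw [pvStep2, PySem.Dict.modify, PySem.Dict.contains_insert, hd]; simp)
        (by rw [pvStep2, PySem.Dict.modify, PySem.Dict.getD_insert, if_neg (fun h => hdd h.symm)]; exact hu)]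

theorem pvReplace (d u : String) (v : List String) :
    ∀ (L : List ((String × String) × List String)) (r : PySem.Dict String (PySem.Dict String (List String))),
    (L.map (·.1)).Nodup → (d, u) ∈ L.map (·.1) →
    (L.map (fun p => if p.1 == (d, u) then ((d, u), v) else p)).foldl pvStep2 r
      = (L.foldl pvStep2 r).insert d (((L.foldl pvStep2 r).getD d PySem.Dict.empty).insert u v) := by
  intro L
  induction L with
  | nil => intro r _ h; simp at h
  | cons kv L ih =>
    intro r hnd hmem
    simp only [List.map_cons, List.nodup_cons] at hnd
    obtain ⟨hk1, hnd'⟩ := hnd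
    simp only [List.map_cons, List.foldl_cons]
    by_cases h : kv.1 = (d, u)
    · have hnotin : (d, u) ∉ L.map (·.1) := by rw [← h]; exact hk1
      have htail : L.map (fun p => if p.1 == (d, u) then ((d, u), v) else p) = L := by
        rw [List.map_congr_left (g := id) (fun p hp => by
          rw [if_neg]
          · rfl
          · simp only [beq_iff_eq]
            intro hpeq
            exact hnotin (hpeq ▸ List.mem_map_of_mem hp)), List.map_id]
      rw [if_pos (by simp [h]), htail]
      have key : pvStep2 r ((d, u), v)
          = (pvStep2 r kv).insert d (((pvStep2 r kv).getD d PySem.Dict.empty).insert u v) := by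
        obtain ⟨k1, w⟩ := kv
        simp only at h
        subst h
        simp only [pvStep2, PySem.Dict.modify]
        rw [PySem.Dict.getD_insert_self, PySem.Dict.insert_insert_self, PySem.Dict.insert_insert_self]
      rw [key]
      exact pvStar d u v L _ hnotin
        (by rw [pvStep2, PySem.Dict.modify, PySem.Dict.contains_insert, h]; simp)
        (by rw [pvStep2, PySem.Dict.modify, h, PySem.Dict.getD_insert_self, PySem.Dict.contains_insert]; simp)
    · rw [if_neg (by simpa using h)]
      have hmem' : (d, u) ∈ L.map (·.1) := by
        rcases List.mem_cons.mp hmem with h' | h'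
        · exact absurd h'.symm h
        · exact h'
      exact ih (pvStep2 r kv) hnd' hmem'

theorem pvRegroup_insert (F : PySem.Dict (String × String) (List String)) (hF : F.keys.Nodup)
    (d u : String) (v : List String) :
    pvRegroup (F.insert (d, u) v)
      = (pvRegroup F).insert d (((pvRegroup F).getD d PySem.Dict.empty).insert u v) := by
  by_cases h : F.contains (d, u) = true
  · unfold pvRegroup
    rw [PySem.Dict.items_insert_of_contains _ v h]
    have hnd : (F.items.map (·.1)).Nodup := by
      simpa [PySem.Dict.keys] using hF
    have hmem : (d, u) ∈ F.items.map (·.1) := by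
      have := (PySem.Dict.contains_iff_mem_keys (d := F) (k := (d, u))).mp h
      simpa [PySem.Dict.keys] using this
    exact pvReplace d u v F.items PySem.Dict.empty hnd hmem
  · unfold pvRegroup
    rw [PySem.Dict.items_insert_of_not_contains _ v (by simpa using h), List.foldl_append]
    rfl

theorem pvNested_lookup (d u : String) :
    ∀ (ts : List (String × String × String)) (r : PySem.Dict String (PySem.Dict String (List String))),
    ((ts.foldl pvStepN r).getD d PySem.Dict.empty).getD u []
      = (r.getD d PySem.Dict.empty).getD u [] ++ (ts.filter (fun t => t.1 == d && t.2.1 == u)).map (·.2.2) := by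
  intro ts
  induction ts with
  | nil => intro r; simp
  | cons t ts ih =>
    intro r
    simp only [List.foldl_cons, List.filter_cons]
    rw [ih]
    by_cases hd : t.1 = d
    · by_cases hu : t.2.1 = u
      · simp [pvStepN, PySem.Dict.modify, hd, hu]
      · simp [pvStepN, PySem.Dict.modify, hd, hu, PySem.Dict.getD_insert, Ne.symm]
    · simp only [pvStepN, PySem.Dict.modify, PySem.Dict.getD_insert]
      rw [if_neg (fun h => hd h.symm)]
      simp [hd]

theorem pvFlat_lookup (d u : String) (ts : List (String × String × String)) :
    (pvFlat ts).getD (d, u) [] = (ts.filter (fun t => t.1 == d && t.2.1 == u)).map (·.2.2) := by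
  unfold pvFlat
  rw [show (ts.foldl pvStepF PySem.Dict.empty)
      = ((ts.map (fun t => ((t.1, t.2.1), t.2.2))).foldl (fun f p => f.modify p.1 [] (fun l => l ++ [p.2])) PySem.Dict.empty) by
    rw [List.foldl_map]; rfl]
  rw [PySem.Dict.getD_foldl_modify_append]
  simp only [PySem.Dict.getD_empty, List.filter_map, List.map_map, List.nil_append]
  induction ts with
  | nil => rfl
  | cons t ts ih =>
    simp only [List.filter_cons, Function.comp]
    by_cases h1 : t.1 = d <;> by_cases h2 : t.2.1 = u <;>
      simp [h1, h2, Prod.ext_iff, ih, Function.comp]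

theorem pvFlat_nodup (ts : List (String × String × String)) : (pvFlat ts).keys.Nodup := by
  unfold pvFlat
  exact PySem.Dict.nodup_keys_foldl_modify_key ts (fun t => (t.1, t.2.1)) [] (fun _ t => fun l => l ++ [t.2.2]) PySem.Dict.empty (by simp)

theorem pvMain (ts : List (String × String × String)) : pvRegroup (pvFlat ts) = pvNested ts := by
  induction ts using List.reverseRecOn with
  | nil => rfl
  | append_singleton ts t ih =>
    have hflat : pvFlat (ts ++ [t])
        = (pvFlat ts).insert (t.1, t.2.1) ((pvFlat ts).getD (t.1, t.2.1) [] ++ [t.2.2]) := by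
      unfold pvFlat
      rw [List.foldl_append]
      rfl
    have hnested : pvNested (ts ++ [t])
        = (pvNested ts).insert t.1 (((pvNested ts).getD t.1 PySem.Dict.empty).insert t.2.1
            (((pvNested ts).getD t.1 PySem.Dict.empty).getD t.2.1 [] ++ [t.2.2])) := by
      unfold pvNested
      rw [List.foldl_append]
      rfl
    rw [hflat, hnested, pvRegroup_insert (pvFlat ts) (pvFlat_nodup ts) t.1 t.2.1, ih]
    congr 2
    rw [pvFlat_lookup]
    unfold pvNested
    rw [pvNested_lookup]
    simp

-- ===== VERDICT (by name: the statement is the Claim_ definition above) =====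
theorem format_recommendations_2_spec : Claim_equal_format_recommendations_2 := by
  intro recs _hDom hPre
  unfold Spec_format_recommendations_2 format_recommendations_2 format_recommendations_2_alt
  rw [pvFoldA_bridge recs PySem.Dict.empty hPre, pvFoldB_bridge recs PySem.Dict.empty hPre]
  rw [show (recs.map pvToT).foldl pvStepN PySem.Dict.empty = pvNested (recs.map pvToT) from rfl]
  rw [show (recs.map pvToT).foldl pvStepF PySem.Dict.empty = pvFlat (recs.map pvToT) from rfl]
  rw [← pvMain (recs.map pvToT)]
  rfl
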